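-- pv_equiv track=rewrite | github.com/Amiannn/espnet | egs2/TEMPLATE/asr1/pyscripts/contextual/rareword/create_rareword_occurrence_aishell.py | occurrence
-- ===== SOURCE A (Python) =====
-- def occurrence(texts, bwords):
--     bword_occurrence = {word: 0 for word in bwords}
--     oov = 0
--     for uid, words in texts:
--         for word in words:
--             if word not in bword_occurrence:
--                 oov += 1
--                 continue
--             bword_occurrence[word] += 1
--     return list(bword_occurrence.values()) + [oov]
-- ===== SOURCE B (Python) =====
-- def occurrence(texts, bwords):
--     words = [w for uid, ws in texts for w in ws]
--     keys = list(dict.fromkeys(bwords))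
--     result = [words.count(w) for w in keys]
--     return result + [len(words) - sum(result)]
-- ===== Notes on version B (the rewrite author's own statement) =====
-- stated objective: alternative
-- what changed: Keeps no count table at all: flattens the words once, then for each distinct bword runs an independent brute-force scan (list.count) over the flattened list, and derives the OOV count arithmetically as total words minus the in-vocabulary sum, instead of A's single pass that maintains a per-key dict and an inline OOV accumulator.
import Mathlib
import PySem

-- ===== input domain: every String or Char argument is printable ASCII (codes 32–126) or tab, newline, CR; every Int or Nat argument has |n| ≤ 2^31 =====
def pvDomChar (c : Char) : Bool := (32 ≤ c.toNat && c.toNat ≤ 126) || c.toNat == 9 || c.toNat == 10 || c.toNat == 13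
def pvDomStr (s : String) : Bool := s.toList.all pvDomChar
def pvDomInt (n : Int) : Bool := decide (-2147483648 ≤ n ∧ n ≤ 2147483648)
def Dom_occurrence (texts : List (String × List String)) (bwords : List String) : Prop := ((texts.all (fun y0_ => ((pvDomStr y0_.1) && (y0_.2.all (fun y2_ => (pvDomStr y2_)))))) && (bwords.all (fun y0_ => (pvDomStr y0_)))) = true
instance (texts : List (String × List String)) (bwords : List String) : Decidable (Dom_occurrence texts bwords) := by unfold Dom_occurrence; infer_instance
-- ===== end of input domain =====

-- B keeps no count table: it scans the flattened word list once per distinct bword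
-- (list.count) and gets the OOV count by subtraction (alternative decomposition).

-- ===== PORT A =====
def occurrence (texts : List (String × List String)) (bwords : List String) : List Int :=
  let bwordOccurrence : PySem.Dict String Int :=
    bwords.foldl (fun d w => d.insert w 0) PySem.Dict.empty
  let s :=
    texts.foldl (fun s t =>
      t.2.foldl (fun s w =>
        if s.1.contains w then (s.1.insert w (s.1.getD w 0 + 1), s.2)
        else (s.1, s.2 + 1)) s) (bwordOccurrence, (0 : Int))
  s.1.values ++ [s.2]

-- ===== PORT B =====
def occurrence_alt (texts : List (String × List String)) (bwords : List String) : List Int :=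
  let words := texts.flatMap (fun t => t.2)
  let keys := PySem.List.dedup bwords
  let result := keys.map (fun w => (PySem.List.count words w : Int))
  result ++ [(words.length : Int) - result.sum]

-- ===== PRECONDITION & SPEC =====
def Spec_occurrence (texts : List (String × List String)) (bwords : List String) (out : List Int) : Prop := out = occurrence_alt texts bwords
instance (texts : List (String × List String)) (bwords : List String) (out : List Int) : Decidable (Spec_occurrence texts bwords out) := by unfold Spec_occurrence; infer_instance

-- ===== CLAIM (what is proved, stated in full; the proofs are below) =====
def Claim_equal_occurrence : Prop := ∀ (texts : List (String × List String)) (bwords : List String), Dom_occurrence texts bwords → Spec_occurrence texts bwords (occurrence texts bwords)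

-- ===== LEMMAS AND PROOFS =====

-- A's dict step: count the word if it is a key, otherwise leave the dict alone.
def pvStepD (d : PySem.Dict String Int) (w : String) : PySem.Dict String Int :=
  if d.contains w then d.insert w (d.getD w 0 + 1) else d

lemma pvStepD_keys (d : PySem.Dict String Int) (w : String) : (pvStepD d w).keys = d.keys := by
  unfold pvStepD
  split_ifs with h
  · exact PySem.Dict.keys_insert_of_contains _ _ h
  · rfl

lemma pvStepD_contains (d : PySem.Dict String Int) (w x : String) :
    (pvStepD d w).contains x = d.contains x := by
  rw [PySem.Dict.contains_eq_decide_mem_keys, PySem.Dict.contains_eq_decide_mem_keys, pvStepD_keys]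

lemma pvFoldD_keys (l : List String) (d : PySem.Dict String Int) :
    (l.foldl pvStepD d).keys = d.keys := by
  induction l generalizing d with
  | nil => rfl
  | cons w t ih => rw [List.foldl_cons, ih, pvStepD_keys]

-- the pair loop of A is the dict loop together with a countP of the out-of-vocabulary words
lemma pvPairSplit (l : List String) (d : PySem.Dict String Int) (o : Int) :
    l.foldl (fun s w =>
        if s.1.contains w then (s.1.insert w (s.1.getD w 0 + 1), s.2)
        else (s.1, s.2 + 1)) (d, o)
      = (l.foldl pvStepD d, o + (l.countP (fun w => !d.contains w) : Int)) := by
  induction l generalizing d o with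
  | nil => simp
  | cons w t ih =>
    rw [List.foldl_cons, List.foldl_cons, List.countP_cons]
    by_cases h : d.contains w
    · have hd : pvStepD d w = d.insert w (d.getD w 0 + 1) := by unfold pvStepD; rw [if_pos h]
      rw [if_pos h, ih, ← hd]
      have hc : t.countP (fun x => !(pvStepD d w).contains x) = t.countP (fun x => !d.contains x) := by
        apply List.countP_congr
        intro x _; rw [pvStepD_contains]
      rw [hc]
      simp [h]
    · have hd : pvStepD d w = d := by unfold pvStepD; rw [if_neg h]
      rw [if_neg h, ih, hd]
      have hb : (!d.contains w) = true := by simp [h]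
      rw [hb]
      simp only [Prod.mk.injEq, if_pos]
      refine ⟨trivial, by push_cast; ring⟩

-- the conditional dict loop only ever touches in-vocabulary words
lemma pvFoldD_filter (l : List String) (d : PySem.Dict String Int) :
    l.foldl pvStepD d
      = (l.filter (fun w => d.contains w)).foldl (fun d w => d.insert w (d.getD w 0 + 1)) d := by
  induction l generalizing d with
  | nil => rfl
  | cons w t ih =>
    rw [List.foldl_cons, List.filter_cons]
    by_cases h : d.contains w
    · have hd : pvStepD d w = d.insert w (d.getD w 0 + 1) := by unfold pvStepD; rw [if_pos h]
      have hf : t.filter (fun x => (pvStepD d w).contains x) = t.filter (fun x => d.contains x) := by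
        apply List.filter_congr
        intro x _; rw [pvStepD_contains]
      rw [hd, if_pos h, List.foldl_cons, ← hd, ih, hf, hd]
    · have hd : pvStepD d w = d := by unfold pvStepD; rw [if_neg h]
      rw [hd, if_neg h, ih]

lemma pvGetD_zero_init (l : List String) (d : PySem.Dict String Int)
    (h : ∀ k, d.getD k 0 = 0) (k : String) :
    (l.foldl (fun d w => d.insert w (0 : Int)) d).getD k 0 = 0 := by
  induction l generalizing d with
  | nil => exact h k
  | cons w t ih =>
    rw [List.foldl_cons]
    exact ih _ (fun k' => by rw [PySem.Dict.getD_insert]; split_ifs <;> simp [h])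

lemma pvCountP_mem_cons (l : List String) (w : String) (t : List String) (hw : w ∉ t) :
    l.countP (fun x => decide (x ∈ w :: t))
      = l.count w + l.countP (fun x => decide (x ∈ t)) := by
  induction l with
  | nil => rfl
  | cons a l ih =>
    rw [List.countP_cons, List.countP_cons, List.count_cons, ih]
    by_cases h1 : a = w
    · subst h1
      simp [hw]
      omega
    · simp [List.mem_cons, h1]
      omega

-- sum of per-key counts over a duplicate-free key list is a countP of membership
lemma pvSumCount (S : List String) (hS : S.Nodup) (l : List String) :
    (S.map (fun w => (l.count w : Int))).sum
      = (l.countP (fun x => decide (x ∈ S)) : Int) := by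
  induction S with
  | nil => simp
  | cons w t ih =>
    rcases List.nodup_cons.mp hS with ⟨hw, ht⟩
    rw [List.map_cons, List.sum_cons, ih ht, pvCountP_mem_cons l w t hw]
    push_cast
    ring

-- ===== VERDICT (by name: the statement is the Claim_ definition above) =====
theorem occurrence_spec : Claim_equal_occurrence := by
  intro texts bwords _
  unfold Spec_occurrence
  simp only [occurrence, occurrence_alt]
  rw [← List.foldl_flatMap (f := fun (t : String × List String) => t.2)]
  set l := texts.flatMap (fun t => t.2) with hl
  set d0 : PySem.Dict String Int := bwords.foldl (fun d w => d.insert w 0) PySem.Dict.empty with hd0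
  have hsplit := pvPairSplit l d0 0
  rw [hsplit]
  set dA := l.foldl pvStepD d0 with hdA
  have hd0keys : d0.keys = PySem.Set.ofList bwords := by
    rw [hd0, PySem.Dict.keys_foldl_insert bwords (fun _ _ => (0 : Int)) PySem.Dict.empty]
    simp [PySem.Dict.keys_empty]
    rfl
  have hkeys : dA.keys = PySem.Set.ofList bwords := by
    rw [hdA, pvFoldD_keys, hd0keys]
  have hnodup : dA.keys.Nodup := by rw [hkeys]; exact PySem.Set.nodup_ofList ..
  have hcont : ∀ w : String, d0.contains w = decide (w ∈ bwords) := by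
    intro w
    rw [PySem.Dict.contains_eq_decide_mem_keys, hd0keys]
    simp [PySem.Set.mem_ofList]
  have hgetD : ∀ w ∈ PySem.Set.ofList bwords, dA.getD w 0 = (l.count w : Int) := by
    intro w hw
    have hcw : d0.contains w = true := by
      rw [hcont]; simpa [PySem.Set.mem_ofList] using hw
    rw [hdA, pvFoldD_filter, PySem.Dict.getD_foldl_insert_add_one]
    have hz : d0.getD w 0 = 0 := by
      rw [hd0]
      exact pvGetD_zero_init bwords PySem.Dict.empty (fun k => by simp [PySem.Dict.getD_empty]) w
    rw [hz, List.count_filter hcw]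
    ring
  -- the two value lists agree
  have hvals : dA.values = (PySem.List.dedup bwords).map (fun w => (PySem.List.count l w : Int)) := by
    rw [PySem.Dict.values_eq_map_keys dA hnodup 0, hkeys]
    simp only [PySem.List.dedup_eq_ofList]
    apply List.map_congr_left
    intro w hw
    rw [hgetD w hw, PySem.List.count_eq]
  -- the oov entries agree
  have hrsum : ((PySem.List.dedup bwords).map (fun w => (PySem.List.count l w : Int))).sum
      = (l.countP (fun x => decide (x ∈ bwords)) : Int) := by
    simp only [PySem.List.dedup_eq_ofList]
    have hm : ((PySem.Set.ofList bwords).map (fun w => ((PySem.List.count l w : Nat) : Int)))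
        = (PySem.Set.ofList bwords).map (fun w => (l.count w : Int)) := by
      apply List.map_congr_left
      intro w _
      rw [PySem.List.count_eq]
    rw [hm, pvSumCount _ (PySem.Set.nodup_ofList ..) l]
    congr 1
    apply List.countP_congr
    intro x _
    simp [PySem.Set.mem_ofList]
  have hoov : (0 : Int) + (l.countP (fun w => !d0.contains w) : Int)
      = (l.length : Int)
        - ((PySem.List.dedup bwords).map (fun w => (PySem.List.count l w : Int))).sum := by
    rw [hrsum]
    have hsplitn : l.countP (fun x => decide (x ∈ bwords))
        + l.countP (fun w => !d0.contains w) = l.length := by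
      have := List.length_eq_countP_add_countP (l := l) (fun x => decide (x ∈ bwords))
      have hcg : l.countP (fun w => !d0.contains w)
          = l.countP (fun a => decide ¬(decide (a ∈ bwords) = true)) := by
        apply List.countP_congr
        intro x _
        rw [hcont]
        simp
      rw [hcg]
      omega
    omega
  rw [hvals, hoov]
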